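-- pv_equiv track=rewrite | github.com/GooDRomka/paper_active_learning | utils.py | init_distribution
-- ===== SOURCE A (Python) =====
-- def init_distribution(labels):
--     all_labels = []
--     for label_n in labels:
--         for label in label_n:
--             all_labels.append(label)
--     unic_labels = set(all_labels)
--     distribution = {}
--     for label in unic_labels:
--         distribution.update({label: all_labels.count(label)})
--     return sorted(distribution.items())
-- ===== SOURCE B (Python) =====
-- def init_distribution(labels):
--     # sort the flattened labels once, then count consecutive runs in a single pass
--     flat = sorted(l for group in labels for l in group)
--     out = []
--     i = 0
--     n = len(flat)
--     while i < n:
--         j = i + 1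
--         while j < n and flat[j] == flat[i]:
--             j += 1
--         out.append((flat[i], j - i))
--         i = j
--     return out
-- ===== Notes on version B (the rewrite author's own statement) =====
-- stated objective: faster
-- what changed: Replaces dedupe-into-a-set plus a full all_labels.count scan per unique label with sort-then-group: the flattened list is sorted once and consecutive equal runs are counted in a single pass, already in sorted order.
import Mathlib
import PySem

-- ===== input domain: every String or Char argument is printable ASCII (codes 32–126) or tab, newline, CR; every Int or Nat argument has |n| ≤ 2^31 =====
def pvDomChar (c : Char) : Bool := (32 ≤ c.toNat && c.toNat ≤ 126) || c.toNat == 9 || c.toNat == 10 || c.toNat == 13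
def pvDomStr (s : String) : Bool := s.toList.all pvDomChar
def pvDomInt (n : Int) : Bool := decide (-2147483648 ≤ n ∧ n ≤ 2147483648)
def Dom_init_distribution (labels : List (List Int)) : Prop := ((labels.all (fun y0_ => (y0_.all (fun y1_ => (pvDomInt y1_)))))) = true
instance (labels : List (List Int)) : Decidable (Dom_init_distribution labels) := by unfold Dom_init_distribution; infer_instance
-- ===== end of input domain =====

-- B replaces A's set-dedupe + per-label rescan (all_labels.count for each unique label)
-- with sort-once-then-count-consecutive-runs in a single pass; measurably faster on large inputs.


-- ===== PORT A =====
-- literal transliteration: flatten by appends, set of unique labels, dict of counts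
-- (one all_labels.count scan per unique label), then sorted(items) (tuple order = lex)
def init_distribution (labels : List (List Int)) : List (Int × Int) :=
  let all_labels := labels.foldl (fun acc label_n => label_n.foldl (fun a label => a ++ [label]) acc) []
  let unic_labels := PySem.Set.ofList all_labels
  let distribution := unic_labels.foldl
    (fun d label => d.insert label ((PySem.List.count all_labels label : Nat) : Int)) PySem.Dict.empty
  PySem.List.sorted distribution.items (fun p => toLex p)

-- ===== PORT B =====
-- the inner while of Source B (advance j over equal elements) is the takeWhile/dropWhile span
def pvRuns : List Int → List (Int × Int)
  | [] => []
  | x :: xs =>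
      (x, ((xs.takeWhile (fun y => y == x)).length : Int) + 1) ::
        pvRuns (xs.dropWhile (fun y => y == x))
termination_by s => s.length
decreasing_by simpa using Nat.lt_succ_of_le (List.length_dropWhile_le _ xs)

def init_distribution_alt (labels : List (List Int)) : List (Int × Int) :=
  pvRuns (PySem.List.sorted (labels.flatMap (fun group => group)) (fun x => x))

-- ===== PRECONDITION & SPEC =====
def Spec_init_distribution (labels : List (List Int)) (out : List (Int × Int)) : Prop := out = init_distribution_alt labels
instance (labels : List (List Int)) (out : List (Int × Int)) : Decidable (Spec_init_distribution labels out) := by unfold Spec_init_distribution; infer_instance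

-- ===== CLAIM (what is proved, stated in full; the proofs are below) =====
def Claim_equal_init_distribution : Prop := ∀ (labels : List (List Int)), Dom_init_distribution labels → Spec_init_distribution labels (init_distribution labels)

-- ===== LEMMAS AND PROOFS =====

-- every element left after dropping the leading x-run is strictly above x
lemma pv_lt_of_mem_dropWhile (x : Int) (xs : List Int) (h : xs.Pairwise (· ≤ ·))
    (hx : ∀ y ∈ xs, x ≤ y) :
    ∀ y ∈ xs.dropWhile (fun y => y == x), x < y := by
  induction xs with
  | nil => simp
  | cons a as ih =>
    by_cases ha : a = x
    · subst ha
      simp only [List.dropWhile_cons, beq_self_eq_true]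
      exact ih h.tail (fun y hy => hx y (List.mem_cons_of_mem _ hy))
    · have hax : (a == x) = false := by simp [ha]
      simp only [List.dropWhile_cons, hax] 
      intro y hy
      rcases List.mem_cons.mp hy with rfl | hy'
      · exact lt_of_le_of_ne (hx y (List.mem_cons_self)) (fun e => ha e.symm)
      · exact lt_of_lt_of_le
          (lt_of_le_of_ne (hx a List.mem_cons_self) (fun e => ha e.symm))
          (List.rel_of_pairwise_cons h hy')

-- characterisation of pvRuns on a ≤-sorted list: strictly increasing keys,
-- each pair is (label, its count in s), and every label of s appears as a key
lemma pv_runs_spec (s : List Int) :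
    s.Pairwise (· ≤ ·) →
    (pvRuns s).Pairwise (fun a b => a.1 < b.1) ∧
    (∀ p ∈ pvRuns s, p.1 ∈ s ∧ p.2 = ((List.count p.1 s : Nat) : Int)) ∧
    (∀ y ∈ s, y ∈ (pvRuns s).map Prod.fst) := by
  induction s using pvRuns.induct with
  | case1 => simp [pvRuns]
  | case2 x xs ih =>
    intro h
    set tw := xs.takeWhile (fun y => y == x) with htw
    set t := xs.dropWhile (fun y => y == x) with ht
    have hsplit : tw ++ t = xs := List.takeWhile_append_dropWhile
    have hxle : ∀ y ∈ xs, x ≤ y := fun y hy => List.rel_of_pairwise_cons h hy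
    have htlt : ∀ y ∈ t, x < y := pv_lt_of_mem_dropWhile x xs h.tail hxle
    have htsub : t.Sublist xs := List.dropWhile_sublist _
    have htpw : t.Pairwise (· ≤ ·) := h.tail.sublist htsub
    obtain ⟨ihpw, ihcnt, ihcov⟩ := ih htpw
    have htw_eq : ∀ y ∈ tw, y = x := by
      intro y hy
      have := List.mem_takeWhile_imp hy
      simpa using this
    have hcnt_tw : List.count x tw = tw.length :=
      List.count_eq_length.mpr (fun b hb => (htw_eq b hb).symm)
    have hcnt_t : List.count x t = 0 :=
      List.count_eq_zero.mpr (fun hmem => lt_irrefl x (htlt x hmem))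
    have hcount_head : List.count x (x :: xs) = tw.length + 1 := by
      rw [List.count_cons_self, ← hsplit, List.count_append, hcnt_tw, hcnt_t]
    refine ⟨?_, ?_, ?_⟩
    · rw [pvRuns]
      refine List.Pairwise.cons ?_ ihpw
      intro p hp
      exact htlt p.1 (ihcnt p hp).1
    · rw [pvRuns]
      intro p hp
      rcases List.mem_cons.mp hp with rfl | hp'
      · refine ⟨List.mem_cons_self, ?_⟩
        simp only [hcount_head]
        push_cast
        ring
      · obtain ⟨hmem, hval⟩ := ihcnt p hp'
        have hne : p.1 ≠ x := fun e => lt_irrefl x (e ▸ htlt p.1 hmem)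
        have htw0 : List.count p.1 tw = 0 :=
          List.count_eq_zero.mpr (fun hm => hne (htw_eq p.1 hm))
        have h1 : List.count p.1 (x :: xs) = List.count p.1 t := by
          rw [← hsplit]
          simp [List.count_append, Ne.symm hne, htw0]
        exact ⟨List.mem_cons_of_mem _ (htsub.mem hmem), by rw [hval, h1]⟩
    · intro y hy
      rcases List.mem_cons.mp hy with rfl | hy'
      · rw [pvRuns]; simp
      · rw [← hsplit] at hy'
        rcases List.mem_append.mp hy' with hy2 | hy2
        · rw [htw_eq y hy2, pvRuns]; simp
        · rw [pvRuns]
          simpa using Or.inr (ihcov y hy2)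

-- inserting a run of fresh, pairwise-distinct keys into a dict appends them in order
lemma pv_items_foldl (f : Int → Int) :
    ∀ (ks : List Int) (d : PySem.Dict Int Int), ks.Nodup →
    (∀ k ∈ ks, ∀ p ∈ d.items, p.1 ≠ k) →
    (ks.foldl (fun d k => d.insert k (f k)) d).items = d.items ++ ks.map (fun k => (k, f k)) := by
  intro ks
  induction ks with
  | nil => simp
  | cons k ks ih =>
    intro d hnd hfresh
    have hcont : d.contains k = false := by
      simp only [PySem.Dict.contains, List.any_eq_false]
      intro p hp
      simpa using hfresh k List.mem_cons_self p hp
    have hins : (d.insert k (f k)).items = d.items ++ [(k, f k)] := by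
      simp [PySem.Dict.insert, hcont]
    simp only [List.foldl_cons]
    rw [ih (d.insert k (f k)) hnd.tail ?_, hins]
    · simp
    · intro k' hk' p hp
      rw [hins] at hp
      rcases List.mem_append.mp hp with hp' | hp'
      · exact hfresh k' (List.mem_cons_of_mem _ hk') p hp'
      · simp only [List.mem_singleton] at hp'
        subst hp'
        intro e
        simp only at e
        exact (List.nodup_cons.mp hnd).1 (by rw [e]; exact hk')

-- ===== VERDICT (by name: the statement is the Claim_ definition above) =====
theorem init_distribution_spec : Claim_equal_init_distribution := by
  intro labels _
  unfold Spec_init_distribution init_distribution init_distribution_alt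
  -- A's flattening is the flatMap of B
  rw [show (labels.foldl (fun acc label_n => label_n.foldl (fun a label => a ++ [label]) acc) []) =
        labels.flatMap (fun group => group) by
      simp only [PySem.List.foldl_append_singleton]
      simpa using PySem.List.foldl_append_eq_flatMap (fun g => g) labels []]
  set flat := labels.flatMap (fun group => group) with hflat
  set s := PySem.List.sorted flat (fun x => x) with hs
  set f := fun k : Int => ((PySem.List.count flat k : Nat) : Int) with hf
  set unic := PySem.Set.ofList flat with hunic
  have hperm_s : s.Perm flat := PySem.List.sorted_perm flat _ false
  have hspw : s.Pairwise (· ≤ ·) := PySem.List.sorted_pairwise flat (fun x => x)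
  obtain ⟨hpw, hcnt, hcov⟩ := pv_runs_spec s hspw
  -- the dict's items are exactly the (label, count) pairs over unic
  have hnd_unic : unic.Nodup := PySem.Set.nodup_ofList flat
  have hitems : (unic.foldl (fun d label => d.insert label (f label)) PySem.Dict.empty).items
      = unic.map (fun k => (k, f k)) := by
    have := pv_items_foldl f unic PySem.Dict.empty hnd_unic (by
      intro k _ p hp
      simp [PySem.Dict.empty] at hp)
    simpa [PySem.Dict.empty] using this
  show PySem.List.sorted
      ((unic.foldl (fun d label => d.insert label (f label)) PySem.Dict.empty).items)
      (fun p => toLex p) = pvRuns s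
  rw [hitems]
  -- both sides list (k, count k) with distinct keys; B's is strictly sorted
  apply PySem.List.sorted_eq_of_perm_of_pairwise_lt
  · -- pvRuns s ~ unic.map (k, f k)
    have hself : pvRuns s = ((pvRuns s).map Prod.fst).map (fun k => (k, f k)) := by
      rw [List.map_map]
      symm
      calc List.map ((fun k => (k, f k)) ∘ Prod.fst) (pvRuns s)
          = List.map id (pvRuns s) := by
            apply List.map_congr_left
            intro p hp
            obtain ⟨_, hval⟩ := hcnt p hp
            have : f p.1 = p.2 := by
              rw [hf, hval]
              simp [PySem.List.count, hperm_s.count_eq]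
            simp [Function.comp, this]
        _ = pvRuns s := List.map_id _
    have hnd_keys : ((pvRuns s).map Prod.fst).Nodup := by
      unfold List.Nodup
      rw [List.pairwise_map]
      exact hpw.imp (fun h => ne_of_lt h)
    have hkeys_perm : ((pvRuns s).map Prod.fst).Perm unic := by
      rw [List.perm_ext_iff_of_nodup hnd_keys hnd_unic]
      intro y
      constructor
      · intro hy
        obtain ⟨p, hp, rfl⟩ := List.mem_map.mp hy
        exact (PySem.Set.mem_ofList flat p.1).mpr (hperm_s.mem_iff.mp (hcnt p hp).1)
      · intro hy
        exact hcov y (hperm_s.mem_iff.mpr ((PySem.Set.mem_ofList flat y).mp hy))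
    rw [hself]
    exact hkeys_perm.map (fun k => (k, f k))
  · exact hpw.imp (fun h => Prod.Lex.toLex_lt_toLex.mpr (Or.inl h))
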